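-- pv_equiv track=rewrite | github.com/jATM0S/rubix_solve | secondLayer.py | dectect_required_side_pieces
-- ===== SOURCE A (Python) =====
-- def dectect_required_side_pieces(rubiks_cube,side_pieces):
--     required_side_pieces=[]
--     required_piece=[]
--
--     for pair in side_pieces:
--         for position in pair:  # Iterate over each position in the current pair
--             if rubiks_cube[position] == rubiks_cube['F5']:  # Check if the position has a white piece
--                 required_side_pieces.append(pair)
--
--     for pair in required_side_pieces:
--         for position in pair:  # Iterate over each position in the current pair
--             if rubiks_cube[position] == rubiks_cube['R5']:  # Check if the position has a white piece
--                 required_piece=pair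
--
--     return required_piece
-- ===== SOURCE B (Python) =====
-- def dectect_required_side_pieces(rubiks_cube, side_pieces):
--     # Scan backwards and return the first pair (i.e. A's last) whose positions
--     # hold both the F5 and the R5 colour; no intermediate list is built.
--     for pair in reversed(side_pieces):
--         if pair:
--             vals = [rubiks_cube[p] for p in pair]
--             if rubiks_cube['F5'] in vals and rubiks_cube['R5'] in vals:
--                 return pair
--     return []
-- ===== Notes on version B (the rewrite author's own statement) =====
-- stated objective: alternative
-- what changed: Replaced A's two forward passes (building an intermediate list of F5-matching pairs, possibly with duplicates, then folding it for the last R5 match) by a single backward scan with early return of the first pair from the end containing both the F5 and R5 colours.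
import Mathlib
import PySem

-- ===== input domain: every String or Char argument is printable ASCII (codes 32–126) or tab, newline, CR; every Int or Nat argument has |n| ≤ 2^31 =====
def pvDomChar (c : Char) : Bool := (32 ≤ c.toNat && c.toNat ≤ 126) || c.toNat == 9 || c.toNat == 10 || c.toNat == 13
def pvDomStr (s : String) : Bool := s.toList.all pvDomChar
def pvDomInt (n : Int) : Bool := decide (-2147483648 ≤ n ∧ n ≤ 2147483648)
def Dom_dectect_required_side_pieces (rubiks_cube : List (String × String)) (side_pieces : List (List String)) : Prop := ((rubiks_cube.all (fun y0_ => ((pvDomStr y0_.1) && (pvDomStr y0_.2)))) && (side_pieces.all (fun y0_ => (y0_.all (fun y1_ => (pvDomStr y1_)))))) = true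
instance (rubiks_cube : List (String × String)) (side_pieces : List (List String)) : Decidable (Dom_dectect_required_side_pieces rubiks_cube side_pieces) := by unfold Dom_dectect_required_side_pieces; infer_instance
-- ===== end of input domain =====

-- B replaces A's two forward passes and intermediate list by one backward scan with
-- early return of the first pair from the end holding both the F5 and R5 colours
-- (objective: alternative decomposition, same asymptotic cost).


-- ===== PORT A =====
-- dict lookups rubiks_cube[k] are ported as PySem.Dict.getD _ k ""; Pre_ guarantees the
-- key is present wherever Python performs the lookup, so the default is never used.
def dectect_required_side_pieces (rubiks_cube : List (String × String)) (side_pieces : List (List String)) : List String :=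
  let required_side_pieces : List (List String) :=
    side_pieces.foldl (fun acc pair =>
      pair.foldl (fun acc2 position =>
        if PySem.Dict.getD (PySem.Dict.mk rubiks_cube) position "" == PySem.Dict.getD (PySem.Dict.mk rubiks_cube) "F5" ""
        then acc2 ++ [pair] else acc2) acc) []
  let required_piece : List String :=
    required_side_pieces.foldl (fun req pair =>
      pair.foldl (fun req2 position =>
        if PySem.Dict.getD (PySem.Dict.mk rubiks_cube) position "" == PySem.Dict.getD (PySem.Dict.mk rubiks_cube) "R5" ""
        then pair else req2) req) []
  required_piece

-- ===== PORT B =====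
-- the 'for pair in reversed(side_pieces): … return pair' loop of Source B
def pvGoB (rubiks_cube : List (String × String)) : List (List String) → List String
  | [] => []
  | pair :: rest =>
    if !pair.isEmpty &&
       (pair.map (fun p => PySem.Dict.getD (PySem.Dict.mk rubiks_cube) p "")).contains (PySem.Dict.getD (PySem.Dict.mk rubiks_cube) "F5" "") &&
       (pair.map (fun p => PySem.Dict.getD (PySem.Dict.mk rubiks_cube) p "")).contains (PySem.Dict.getD (PySem.Dict.mk rubiks_cube) "R5" "")
    then pair else pvGoB rubiks_cube rest

def dectect_required_side_pieces_alt (rubiks_cube : List (String × String)) (side_pieces : List (List String)) : List String :=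
  pvGoB rubiks_cube side_pieces.reverse

-- ===== PRECONDITION & SPEC =====
-- Pre_ excludes exactly the inputs on which Python A raises KeyError: some listed
-- position is not a key of the dict, or 'F5' is missing while some pair is nonempty,
-- or 'R5' is missing while some pair has an F5-coloured position.
def Pre_dectect_required_side_pieces (rubiks_cube : List (String × String)) (side_pieces : List (List String)) : Prop :=
  (∀ pair ∈ side_pieces, ∀ p ∈ pair, (PySem.Dict.get? (PySem.Dict.mk rubiks_cube) p).isSome) ∧
  ((∃ pair ∈ side_pieces, pair ≠ []) → (PySem.Dict.get? (PySem.Dict.mk rubiks_cube) "F5").isSome) ∧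
  ((∃ pair ∈ side_pieces, ∃ p ∈ pair,
      PySem.Dict.getD (PySem.Dict.mk rubiks_cube) p "" = PySem.Dict.getD (PySem.Dict.mk rubiks_cube) "F5" "") →
    (PySem.Dict.get? (PySem.Dict.mk rubiks_cube) "R5").isSome)
instance (rubiks_cube : List (String × String)) (side_pieces : List (List String)) : Decidable (Pre_dectect_required_side_pieces rubiks_cube side_pieces) := by unfold Pre_dectect_required_side_pieces; infer_instance

def pvWitness_dectect_required_side_pieces : (List (String × String)) × List (List String) :=
  ([("F5", "w"), ("R5", "r"), ("a", "w"), ("b", "r")], [["a", "b"]])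

def Spec_dectect_required_side_pieces (rubiks_cube : List (String × String)) (side_pieces : List (List String)) (out : List String) : Prop := out = dectect_required_side_pieces_alt rubiks_cube side_pieces
instance (rubiks_cube : List (String × String)) (side_pieces : List (List String)) (out : List String) : Decidable (Spec_dectect_required_side_pieces rubiks_cube side_pieces out) := by unfold Spec_dectect_required_side_pieces; infer_instance

-- ===== CLAIM (what is proved, stated in full; the proofs are below) =====
def Claim_equal_dectect_required_side_pieces : Prop := ∀ (rubiks_cube : List (String × String)) (side_pieces : List (List String)), Dom_dectect_required_side_pieces rubiks_cube side_pieces → Pre_dectect_required_side_pieces rubiks_cube side_pieces → Spec_dectect_required_side_pieces rubiks_cube side_pieces (dectect_required_side_pieces rubiks_cube side_pieces)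

-- ===== LEMMAS AND PROOFS =====

-- the per-pair predicate both programs decide: the pair holds F5's and R5's colour
def pvQ (rc : List (String × String)) (pair : List String) : Bool :=
  pair.any (fun p => PySem.Dict.getD (PySem.Dict.mk rc) p "" == PySem.Dict.getD (PySem.Dict.mk rc) "F5" "") &&
  pair.any (fun p => PySem.Dict.getD (PySem.Dict.mk rc) p "" == PySem.Dict.getD (PySem.Dict.mk rc) "R5" "")

-- membership of v in [f(p) for p in l] is an any-scan over l
theorem pvContainsMap (f : String → String) (l : List String) (v : String) :
    (l.map f).contains v = l.any (fun p => f p == v) := by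
  induction l with
  | nil => rfl
  | cons x xs ih =>
    have hswap : (v == f x) = (f x == v) := by
      rw [Bool.eq_iff_iff]; simp only [beq_iff_eq]; exact eq_comm
    simp only [List.map_cons, List.contains_cons, List.any_cons, ih, hswap]

-- B's loop is find? over the reversed list
theorem pvGoB_eq_find (rc : List (String × String)) (l : List (List String)) :
    pvGoB rc l = ((l.find? (pvQ rc)).getD []) := by
  induction l with
  | nil => rfl
  | cons pair rest ih =>
    have hcond : (!pair.isEmpty &&
        (pair.map (fun p => PySem.Dict.getD (PySem.Dict.mk rc) p "")).contains (PySem.Dict.getD (PySem.Dict.mk rc) "F5" "") &&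
        (pair.map (fun p => PySem.Dict.getD (PySem.Dict.mk rc) p "")).contains (PySem.Dict.getD (PySem.Dict.mk rc) "R5" "")) = pvQ rc pair := by
      cases pair with
      | nil => simp [pvQ]
      | cons x xs =>
        rw [pvContainsMap, pvContainsMap]
        simp [pvQ]
    rw [pvGoB, hcond]
    cases h : pvQ rc pair with
    | true => simp [List.find?, h]
    | false => simp [List.find?, h, ih]

-- last-match foldl over l is first match on l.reverse
theorem pvFoldl_last_find (q : List String → Bool) (l : List (List String)) (d : List String) :
    List.foldl (fun r x => if q x then x else r) d l = ((l.reverse.find? q).getD d) := by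
  induction l generalizing d with
  | nil => rfl
  | cons x l ih =>
    simp only [List.foldl_cons, List.reverse_cons, List.find?_append, ih]
    cases h : l.reverse.find? q with
    | some y => simp
    | none =>
      cases hx : q x <;> simp [List.find?, hx]

-- inner R5 loop: set to pair iff some position matches
theorem pvInnerR5 (c : String → Bool) (pair : List String) (ps : List String) (req : List String) :
    List.foldl (fun r p => if c p then pair else r) req ps
      = if ps.any c then pair else req := by
  induction ps generalizing req with
  | nil => rfl
  | cons p ps ih =>
    simp only [List.foldl_cons, List.any_cons, ih]
    rcases Bool.eq_false_or_eq_true (c p) with hcp | hcp <;> simp [hcp]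

-- first loop: appended value list, as a filter-map block per pair
theorem pvInnerF5 (c : String → Bool) (pair : List String) (ps : List String) (acc : List (List String)) :
    List.foldl (fun a p => if c p then a ++ [pair] else a) acc ps
      = acc ++ (ps.filter c).map (fun _ => pair) := by
  induction ps generalizing acc with
  | nil => simp
  | cons p ps ih =>
    cases hc : c p <;> simp [hc, ih]

def pvOut (rc : List (String × String)) (sp : List (List String)) : List (List String) :=
  sp.flatMap (fun pair =>
    (pair.filter (fun p => PySem.Dict.getD (PySem.Dict.mk rc) p "" == PySem.Dict.getD (PySem.Dict.mk rc) "F5" "")).map (fun _ => pair))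

theorem pvFirstLoop (rc : List (String × String)) (sp : List (List String)) (acc : List (List String)) :
    sp.foldl (fun a pair =>
        pair.foldl (fun a2 p =>
          if PySem.Dict.getD (PySem.Dict.mk rc) p "" == PySem.Dict.getD (PySem.Dict.mk rc) "F5" "" then a2 ++ [pair] else a2) a) acc
      = acc ++ pvOut rc sp := by
  induction sp generalizing acc with
  | nil => simp [pvOut]
  | cons pair sp ih =>
    rw [List.foldl_cons, pvInnerF5, ih]
    simp [pvOut]

-- a fold of the last-match step over a constant block of copies of `pair`
theorem pvBlock (q : List String → Bool) (pair : List String) (m : List String) (d : List String) :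
    List.foldl (fun r x => if q x then x else r) d (m.map (fun _ => pair))
      = if !m.isEmpty && q pair then pair else d := by
  induction m generalizing d with
  | nil => rfl
  | cons a m ih =>
    simp only [List.map_cons, List.foldl_cons, ih]
    cases hq : q pair <;> cases hm : m.isEmpty <;> simp

-- the second loop over pvOut equals the combined last-match fold over side_pieces
theorem pvSecondLoop (rc : List (String × String)) (sp : List (List String)) (d : List String) :
    List.foldl (fun r pair =>
        if pair.any (fun p => PySem.Dict.getD (PySem.Dict.mk rc) p "" == PySem.Dict.getD (PySem.Dict.mk rc) "R5" "") then pair else r)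
      d (pvOut rc sp)
      = List.foldl (fun r pair => if pvQ rc pair then pair else r) d sp := by
  induction sp generalizing d with
  | nil => rfl
  | cons pair sp ih =>
    simp only [pvOut, List.flatMap_cons, List.foldl_append, List.foldl_cons]
    rw [pvBlock]
    have hne : (!(pair.filter (fun p => PySem.Dict.getD (PySem.Dict.mk rc) p "" == PySem.Dict.getD (PySem.Dict.mk rc) "F5" "")).isEmpty)
        = pair.any (fun p => PySem.Dict.getD (PySem.Dict.mk rc) p "" == PySem.Dict.getD (PySem.Dict.mk rc) "F5" "") := by
      rw [Bool.eq_iff_iff]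
      simp [List.any_eq_true]
    rw [hne]
    have : (pair.any (fun p => PySem.Dict.getD (PySem.Dict.mk rc) p "" == PySem.Dict.getD (PySem.Dict.mk rc) "F5" "") &&
            pair.any (fun p => PySem.Dict.getD (PySem.Dict.mk rc) p "" == PySem.Dict.getD (PySem.Dict.mk rc) "R5" "")) = pvQ rc pair := rfl
    rw [this]
    exact ih _

-- ===== VERDICT (by name: the statement is the Claim_ definition above) =====
theorem dectect_required_side_pieces_spec : Claim_equal_dectect_required_side_pieces := by
  intro rc sp _ _
  unfold Spec_dectect_required_side_pieces dectect_required_side_pieces dectect_required_side_pieces_alt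
  rw [pvGoB_eq_find]
  have h1 := pvFirstLoop rc sp []
  have hinner : (fun (req : List String) (pair : List String) =>
      pair.foldl (fun r p => if PySem.Dict.getD (PySem.Dict.mk rc) p "" == PySem.Dict.getD (PySem.Dict.mk rc) "R5" "" then pair else r) req)
      = fun req pair => if pair.any (fun p => PySem.Dict.getD (PySem.Dict.mk rc) p "" == PySem.Dict.getD (PySem.Dict.mk rc) "R5" "") then pair else req := by
    funext req pair; exact pvInnerR5 _ pair pair req
  calc _ = List.foldl (fun r pair =>
            if pair.any (fun p => PySem.Dict.getD (PySem.Dict.mk rc) p "" == PySem.Dict.getD (PySem.Dict.mk rc) "R5" "") then pair else r)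
          [] (pvOut rc sp) := by rw [h1]; simp only [List.nil_append, hinner]
    _ = List.foldl (fun r pair => if pvQ rc pair then pair else r) [] sp := pvSecondLoop rc sp []
    _ = ((sp.reverse.find? (pvQ rc)).getD []) := pvFoldl_last_find _ sp []
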